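-- pv_equiv track=rewrite | github.com/algo-gogo/algo_study | 프로그래머스/코딩테스트/모의고사/1차/3.py | solution
-- ===== SOURCE A (Python) =====
-- def solution(order):
--     answer = 0
--     stack = []
--
--     # order 의 등록된 수
--     now = 0
--     # 트럭의 짐
--     zim = 1
--     result_list = []
--     max_num = max(order)
--     while True:
--         try:
--             if max_num + 1 < zim:
--                 break
--             if zim == order[now]:
--                 result_list.append(order[now])
--                 zim += 1
--                 now += 1
--             elif len(stack) > 0 and stack[-1] == order[now]:
--                 stack.pop()
--                 result_list.append(order[now])
--                 now += 1
--             else: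
--                 stack.append(zim)
--                 zim += 1
--         except:
--             zim += 1
--
--     return len(result_list)
-- ===== SOURCE B (Python) =====
-- def solution(order):
--     # A box t can be unloaded now iff t is the next fresh box (t > every box seen so
--     # far) or t is the LARGEST box not yet unloaded among 1..m (the stack top is
--     # always the largest pending box).  So instead of simulating the stack we keep
--     # the set of unloaded boxes and the running maximum.
--     seen = set()
--     m = 0
--     answer = 0
--     for t in order:
--         if t < 1:
--             break
--         if t <= m:
--             u = m
--             while u in seen:
--                 u -= 1
--             if u != t:
--                 break
--         else:
--             m = t
--         seen.add(t)
--         answer += 1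
--     return answer
-- ===== Notes on version B (the rewrite author's own statement) =====
-- stated objective: alternative
-- what changed: Replaces A's explicit-stack simulation (while-True, try/except, push/pop) by a stackless characterisation: keep the set of already-unloaded boxes and the running maximum, and match a target iff it is a fresh maximum or the largest not-yet-unloaded box (found by scanning the seen-set downward).
import Mathlib
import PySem

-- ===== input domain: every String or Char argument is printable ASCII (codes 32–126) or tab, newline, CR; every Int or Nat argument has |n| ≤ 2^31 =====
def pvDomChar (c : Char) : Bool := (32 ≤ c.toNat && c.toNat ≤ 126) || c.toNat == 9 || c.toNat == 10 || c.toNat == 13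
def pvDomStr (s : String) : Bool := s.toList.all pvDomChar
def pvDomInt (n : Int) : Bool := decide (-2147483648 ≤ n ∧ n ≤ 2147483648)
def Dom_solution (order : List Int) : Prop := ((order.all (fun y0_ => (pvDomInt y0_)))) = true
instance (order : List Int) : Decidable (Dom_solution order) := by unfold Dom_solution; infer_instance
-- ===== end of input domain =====

-- B replaces A's explicit-stack simulation by a stackless one: it keeps the set of
-- already-unloaded boxes and the running maximum, matching a target iff it is a fresh
-- maximum or the largest box not yet unloaded (return value only).

-- ===== PORT A =====
-- A's while-True loop; the Python list `stack` (append / stack[-1] / pop at the end)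
-- is represented head-first: push = cons, stack[-1] = head, pop = tail.
-- `now` is a Python int that is only ever 0,1,2,… so it is carried as a Nat index;
-- order[now] for now ≥ len(order) raises IndexError, caught by the bare except → zim += 1.
-- The extra Nat argument is FUEL, a pure totality guard: every iteration strictly
-- decreases 2*(m+2-zim).toNat + stack.length, and `solution` hands the loop more fuel
-- than that initial measure, so the fuel-0 fallback is never reached (proved below).
def solutionLoop (order : List Int) (m : Int) : Nat → Nat → Int → List Int → Int → Int
  | 0, _, _, _, cnt => cnt
  | fuel + 1, now, zim, stack, cnt =>
    if m + 1 < zim then cnt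
    else
      match order[now]? with
      | none => solutionLoop order m fuel now (zim + 1) stack cnt      -- except: zim += 1
      | some t =>
        if zim = t then
          solutionLoop order m fuel (now + 1) (zim + 1) stack (cnt + 1)
        else
          match stack with
          | top :: rest =>
            if top = t then solutionLoop order m fuel (now + 1) zim rest (cnt + 1)
            else solutionLoop order m fuel now (zim + 1) (zim :: top :: rest) cnt
          | [] => solutionLoop order m fuel now (zim + 1) [zim] cnt

def solution (order : List Int) : Int :=
  match PySem.List.max? order (fun x => x) with
  | none => 0        -- unreachable under Pre_: Python's max([]) raises ValueError
  | some m => solutionLoop order m (2 * (m + 1).toNat + 1) 0 1 [] 0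

-- ===== PORT B =====
-- the `while u in seen: u -= 1` loop of Source B; the Nat argument is FUEL, a pure
-- totality guard: each iteration strictly decreases u through members of the finite
-- set `seen`, so seen.length + 1 steps always suffice (proved below).
def findU (seen : PySem.Set Int) : Nat → Int → Int
  | 0, u => u
  | fuel + 1, u => if PySem.Set.contains seen u then findU seen fuel (u - 1) else u

-- the `for t in order` loop of Source B, with its two `break`s
def goSeen : List Int → PySem.Set Int → Int → Int → Int
  | [], _, _, answer => answer
  | t :: rest, seen, m, answer =>
    if t < 1 then answer
    else if t ≤ m then
      let u := findU seen (seen.length + 1) m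
      if u ≠ t then answer
      else goSeen rest (PySem.Set.add seen t) m (answer + 1)
    else goSeen rest (PySem.Set.add seen t) t (answer + 1)

def solution_alt (order : List Int) : Int := goSeen order PySem.Set.empty 0 0

-- ===== PRECONDITION & SPEC =====
-- Pre_ excludes only the empty list, on which Python A raises ValueError (max of empty sequence).
def Pre_solution (order : List Int) : Prop := order ≠ []
instance (order : List Int) : Decidable (Pre_solution order) := by unfold Pre_solution; infer_instance
def pvWitness_solution : List Int := ([2, 1, 3])

def Spec_solution (order : List Int) (out : Int) : Prop := out = solution_alt order
instance (order : List Int) (out : Int) : Decidable (Spec_solution order out) := by unfold Spec_solution; infer_instance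

-- ===== CLAIM (what is proved, stated in full; the proofs are below) =====
def Claim_equal_solution : Prop := ∀ (order : List Int), Dom_solution order → Pre_solution order → Spec_solution order (solution order)

-- ===== LEMMAS AND PROOFS =====

-- proof-layer intermediate: the textbook stack simulation, used only as a bridge
-- between A's loop and B's seen-set formulation
def fillS : Nat → Int → Int → List Int → Int × List Int
  | 0, _, box, stack => (box, stack)
  | f + 1, t, box, stack =>
    if box ≤ t then fillS f t (box + 1) (box :: stack) else (box, stack)

def goStack (targets : List Int) (box : Int) (stack : List Int) (answer : Int) : Int :=
  match targets with
  | [] => answer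
  | t :: rest =>
    let p := fillS (t + 1 - box).toNat t box stack
    match p.2 with
    | top :: rest' => if top = t then goStack rest p.1 rest' (answer + 1) else answer
    | [] => answer

lemma fillS_gt {t box : Int} (f : Nat) (stack : List Int) (h : ¬ box ≤ t) :
    fillS f t box stack = (box, stack) := by
  cases f <;> simp [fillS, h]

lemma fillS_le {t box : Int} (stack : List Int) (h : box ≤ t) :
    fillS (t + 1 - box).toNat t box stack
      = fillS (t + 1 - (box + 1)).toNat t (box + 1) (box :: stack) := by
  have he : (t + 1 - box).toNat = (t + 1 - (box + 1)).toNat + 1 := by omega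
  rw [he]; simp [fillS, h]

lemma drop_cons_of_get (order : List Int) (now : Nat) (t : Int)
    (h : order[now]? = some t) : order.drop now = t :: order.drop (now + 1) := by
  have hlt : now < order.length := by
    by_contra hc
    rw [List.getElem?_eq_none_iff.mpr (by omega)] at h; cases h
  rw [List.drop_eq_getElem_cons hlt]
  rw [List.getElem?_eq_getElem hlt] at h
  simp only [Option.some.injEq] at h
  rw [h]

lemma drop_nil_of_get (order : List Int) (now : Nat)
    (h : order[now]? = none) : order.drop now = [] := by
  rw [List.getElem?_eq_none_iff] at h
  rw [List.drop_eq_nil_iff]; omega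

-- one-step unfolding lemmas for A's loop
lemma loop_break {order : List Int} {m : Int} {fuel now : Nat} {zim : Int}
    {stack : List Int} {cnt : Int} (hbr : m + 1 < zim) :
    solutionLoop order m (fuel + 1) now zim stack cnt = cnt := by
  simp [solutionLoop, hbr]

lemma loop_none {order : List Int} {m : Int} {fuel now : Nat} {zim : Int}
    {stack : List Int} {cnt : Int} (hbr : ¬ m + 1 < zim) (h : order[now]? = none) :
    solutionLoop order m (fuel + 1) now zim stack cnt
      = solutionLoop order m fuel now (zim + 1) stack cnt := by
  simp [solutionLoop, hbr, h]

lemma loop_match {order : List Int} {m : Int} {fuel now : Nat} {zim : Int}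
    {stack : List Int} {cnt t : Int} (hbr : ¬ m + 1 < zim)
    (h : order[now]? = some t) (hz : zim = t) :
    solutionLoop order m (fuel + 1) now zim stack cnt
      = solutionLoop order m fuel (now + 1) (zim + 1) stack (cnt + 1) := by
  subst hz; simp [solutionLoop, hbr, h]

lemma loop_pop {order : List Int} {m : Int} {fuel now : Nat} {zim : Int}
    {rest : List Int} {cnt t top : Int} (hbr : ¬ m + 1 < zim)
    (h : order[now]? = some t) (hz : ¬ zim = t) (htop : top = t) :
    solutionLoop order m (fuel + 1) now zim (top :: rest) cnt
      = solutionLoop order m fuel (now + 1) zim rest (cnt + 1) := by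
  simp [solutionLoop, hbr, h, hz, htop]

lemma loop_push {order : List Int} {m : Int} {fuel now : Nat} {zim : Int}
    {rest : List Int} {cnt t top : Int} (hbr : ¬ m + 1 < zim)
    (h : order[now]? = some t) (hz : ¬ zim = t) (htop : ¬ top = t) :
    solutionLoop order m (fuel + 1) now zim (top :: rest) cnt
      = solutionLoop order m fuel now (zim + 1) (zim :: top :: rest) cnt := by
  simp [solutionLoop, hbr, h, hz, htop]

lemma loop_push_nil {order : List Int} {m : Int} {fuel now : Nat} {zim : Int}
    {cnt t : Int} (hbr : ¬ m + 1 < zim)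
    (h : order[now]? = some t) (hz : ¬ zim = t) :
    solutionLoop order m (fuel + 1) now zim [] cnt
      = solutionLoop order m fuel now (zim + 1) [zim] cnt := by
  simp [solutionLoop, hbr, h, hz]

-- invariant linking A's loop to the stack simulation: with enough fuel, from any state
-- whose stack elements are all below zim and which, past the break bound, cannot pop
-- the current target, A's loop computes exactly goStack on the remaining suffix.
lemma loop_eq_goStack (order : List Int) (m : Int)
    (hmax : ∀ x ∈ order, x ≤ m) :
    ∀ (fuel now : Nat) (zim : Int) (stack : List Int) (cnt : Int),
      2 * (m + 2 - zim).toNat + stack.length < fuel →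
      (∀ x ∈ stack, x < zim) →
      (m + 1 < zim → ∀ t, order[now]? = some t → stack.head? ≠ some t) →
      solutionLoop order m fuel now zim stack cnt = goStack (order.drop now) zim stack cnt := by
  intro fuel
  induction fuel with
  | zero => intro now zim stack cnt hfuel _ _; omega
  | succ fuel ih =>
    intro now zim stack cnt hfuel hinv hP
    by_cases hbr : m + 1 < zim
    · -- A breaks and returns cnt; the stack simulation also breaks (or is done)
      rw [loop_break hbr]
      rcases h : order[now]? with _ | t
      · rw [drop_nil_of_get order now h]; rfl
      · have hd := drop_cons_of_get order now t h
        have ht : t ∈ order := List.mem_of_mem_drop (hd ▸ List.mem_cons_self ..)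
        have htlt : t < zim := lt_of_le_of_lt (hmax t ht) (by omega)
        have hhd := hP hbr t h
        rw [hd]
        cases stack with
        | nil =>
          simp only [goStack]
          rw [fillS_gt (t := t) (box := zim) _ [] (by omega)]
        | cons top rest =>
          have htop : ¬ top = t := by simpa using hhd
          simp only [goStack]
          rw [fillS_gt (t := t) (box := zim) _ (top :: rest) (by omega)]
          simp [htop]
    · rcases h : order[now]? with _ | t
      · -- except branch: now is past the end, only zim grows; the suffix is empty
        rw [loop_none hbr h]
        rw [ih now (zim + 1) stack cnt (by omega) (by intro x hx; have := hinv x hx; omega)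
              (by intro _ t' ht'; rw [h] at ht'; cases ht')]
        rw [drop_nil_of_get order now h]; rfl
      · have hd := drop_cons_of_get order now t h
        have ht : t ∈ order := List.mem_of_mem_drop (hd ▸ List.mem_cons_self ..)
        by_cases hz : zim = t
        · -- direct match: A appends without touching the stack; fillS pushes t and pops it
          subst hz
          rw [loop_match hbr h rfl]
          rw [ih (now + 1) (zim + 1) stack (cnt + 1)
                (by have := hmax _ ht; omega)
                (by intro x hx; have := hinv x hx; omega)
                (by intro hbig; exfalso; have := hmax _ ht; omega)]
          rw [hd]
          simp only [goStack]
          rw [fillS_le stack (le_refl zim)]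
          have h0 : (zim + 1 - (zim + 1)).toNat = 0 := by omega
          rw [h0]
          simp [fillS]
        · cases stack with
          | nil =>
            -- push onto the empty stack
            rw [loop_push_nil hbr h hz]
            rw [ih now (zim + 1) [zim] cnt (by simp at hfuel ⊢; omega)
                  (by intro x hx; simp at hx; omega)
                  (by
                    intro hbig t' ht'
                    rw [h] at ht'
                    injection ht' with ht'
                    subst ht'
                    simp
                    omega)]
            rw [hd]
            by_cases hc : zim ≤ t
            · simp only [goStack]
              rw [fillS_le [] hc]
            · simp only [goStack]
              rw [fillS_gt _ ([] : List Int) hc, fillS_gt _ [zim] (by omega)]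
              simp [hz]
          | cons top rest =>
            by_cases htop : top = t
            · -- pop branch: stack top matches
              rw [loop_pop hbr h hz htop]
              rw [ih (now + 1) zim rest (cnt + 1)
                    (by simp at hfuel; omega)
                    (by intro x hx; exact hinv x (List.mem_cons_of_mem _ hx))
                    (by intro hbig; exact absurd hbig hbr)]
              rw [hd]
              simp only [goStack]
              have htlt : top < zim := hinv top (by simp)
              rw [fillS_gt _ (top :: rest) (by omega)]
              simp [htop]
            · -- push branch: neither zim nor the stack top matches order[now]
              rw [loop_push hbr h hz htop]
              rw [ih now (zim + 1) (zim :: top :: rest) cnt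
                    (by simp at hfuel ⊢; omega)
                    (by
                      intro x hx
                      rcases List.mem_cons.mp hx with rfl | hx
                      · omega
                      · have := hinv x hx; omega)
                    (by
                      intro hbig t' ht'
                      rw [h] at ht'
                      injection ht' with ht'
                      subst ht'
                      simp
                      omega)]
              rw [hd]
              by_cases hc : zim ≤ t
              · simp only [goStack]
                rw [fillS_le (top :: rest) hc]
              · have htlt : top < zim := hinv top (by simp)
                simp only [goStack]
                rw [fillS_gt _ (top :: rest) hc, fillS_gt _ (zim :: top :: rest) (by omega)]
                simp [htop, hz]

-- the descending list of boxes in 1..m not yet unloaded = A's stack, head-first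
def stackOf : Nat → List Int → List Int
  | 0, _ => []
  | k + 1, seen =>
    if ((k : Int) + 1) ∈ seen then stackOf k seen
    else ((k : Int) + 1) :: stackOf k seen

lemma mem_stackOf : ∀ (m : Nat) (seen : List Int) (x : Int),
    x ∈ stackOf m seen ↔ (1 ≤ x ∧ x ≤ (m : Int) ∧ x ∉ seen) := by
  intro m
  induction m with
  | zero => intro seen x; simp [stackOf]; omega
  | succ k ih =>
    intro seen x
    simp only [stackOf]
    split_ifs with hk
    · rw [ih]
      constructor
      · rintro ⟨h1, h2, h3⟩; refine ⟨h1, by push_cast; omega, h3⟩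
      · rintro ⟨h1, h2, h3⟩
        refine ⟨h1, ?_, h3⟩
        have : x ≠ (k : Int) + 1 := fun he => h3 (he ▸ hk)
        push_cast at h2 ⊢; omega
    · simp only [List.mem_cons, ih]
      constructor
      · rintro (rfl | ⟨h1, h2, h3⟩)
        · exact ⟨by omega, by push_cast; omega, hk⟩
        · exact ⟨h1, by push_cast; omega, h3⟩
      · rintro ⟨h1, h2, h3⟩
        by_cases hx : x = (k : Int) + 1
        · exact Or.inl hx
        · right; refine ⟨h1, ?_, h3⟩; push_cast at h2; omega

lemma stackOf_head_prop : ∀ (m : Nat) (seen : List Int) (t : Int) (r : List Int),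
    stackOf m seen = t :: r → (t ∉ seen ∧ 1 ≤ t ∧ t ≤ (m : Int) ∧
      ∀ v, t < v → v ≤ (m : Int) → v ∈ seen) := by
  intro m
  induction m with
  | zero => intro seen t r h; simp [stackOf] at h
  | succ k ih =>
    intro seen t r h
    simp only [stackOf] at h
    split_ifs at h with hk
    · obtain ⟨h1, h2, h3, h4⟩ := ih seen t r h
      refine ⟨h1, h2, by push_cast; omega, ?_⟩
      intro v hv1 hv2
      by_cases hvk : v = (k : Int) + 1
      · exact hvk ▸ hk
      · exact h4 v hv1 (by push_cast at hv2 ⊢; omega)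
    · injection h with h h'
      subst h
      exact ⟨hk, by omega, by push_cast; omega, fun v hv1 hv2 => by push_cast at hv2; omega⟩

lemma stackOf_nil_prop : ∀ (m : Nat) (seen : List Int),
    stackOf m seen = [] → ∀ v, 1 ≤ v → v ≤ (m : Int) → v ∈ seen := by
  intro m seen h v hv1 hv2
  by_contra hvs
  have : v ∈ stackOf m seen := (mem_stackOf m seen v).mpr ⟨hv1, hv2, hvs⟩
  rw [h] at this; cases this

lemma stackOf_append_of_gt : ∀ (m : Nat) (seen : List Int) (t : Int),
    (m : Int) < t → stackOf m (seen ++ [t]) = stackOf m seen := by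
  intro m
  induction m with
  | zero => intro seen t _; rfl
  | succ k ih =>
    intro seen t ht
    have hne : ((k : Int) + 1) ≠ t := by push_cast at ht; omega
    have hmem : (((k : Int) + 1) ∈ seen ++ [t]) ↔ (((k : Int) + 1) ∈ seen) := by
      simp [hne]
    have hrec := ih seen t (by push_cast at ht ⊢; omega)
    simp only [stackOf, hmem, hrec]

lemma stackOf_pop : ∀ (m : Nat) (seen : List Int) (t : Int) (r : List Int),
    stackOf m seen = t :: r → stackOf m (seen ++ [t]) = r := by
  intro m
  induction m with
  | zero => intro seen t r h; simp [stackOf] at h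
  | succ k ih =>
    intro seen t r h
    simp only [stackOf] at h ⊢
    split_ifs at h with hk
    · have ht := stackOf_head_prop k seen t r h
      have hne : ((k : Int) + 1) ≠ t := fun he => ht.1 (he ▸ hk)
      rw [if_pos (by simp [hk])]
      exact ih seen t r h
    · injection h with h1 h2
      subst h1
      rw [if_pos (by simp)]
      rw [stackOf_append_of_gt k seen _ (by omega)]
      exact h2

-- findU returns the largest value ≤ u that is not in seen, given enough fuel
lemma filter_lt_mono (l : List Int) (u : Int) :
    (l.filter (fun x => decide (x < u))).length ≤ (l.filter (fun x => decide (x ≤ u))).length := by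
  induction l with
  | nil => simp
  | cons a t ih =>
    by_cases h1 : a < u <;> by_cases h2 : a ≤ u <;>
      simp [h1, h2] <;> omega

lemma filter_lt_pred (seen : List Int) (u : Int) (hu : u ∈ seen) :
    (seen.filter (fun x => decide (x < u))).length < (seen.filter (fun x => decide (x ≤ u))).length := by
  induction seen with
  | nil => cases hu
  | cons a t ih =>
    by_cases ha : a = u
    · subst ha
      have h1 : ¬ (a < a) := by omega
      have h2 : a ≤ a := le_refl a
      simp only [List.filter_cons, h1, h2]
      simp
      have := filter_lt_mono t a
      omega
    · have ht : u ∈ t := by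
        rcases List.mem_cons.mp hu with h | h
        · exact absurd h.symm ha
        · exact h
      have := ih ht
      by_cases h1 : a < u <;> by_cases h2 : a ≤ u <;>
        simp [h1, h2] <;> omega

lemma findU_correct (seen : List Int) :
    ∀ (fuel : Nat) (u : Int),
      (seen.filter (fun x => decide (x ≤ u))).length < fuel →
      (findU seen fuel u ∉ seen ∧ findU seen fuel u ≤ u ∧
        ∀ v, findU seen fuel u < v → v ≤ u → v ∈ seen) := by
  intro fuel
  induction fuel with
  | zero => intro u h; omega
  | succ f ih =>
    intro u hfu
    by_cases hc : PySem.Set.contains seen u = true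
    · have hu : u ∈ seen := by simpa [PySem.Set.contains_eq_listContains] using hc
      rw [show findU seen (f + 1) u = findU seen f (u - 1) from by simp only [findU, hc, if_true]]
      have hco : seen.filter (fun x => decide (x ≤ u - 1))
          = seen.filter (fun x => decide (x < u)) :=
        List.filter_congr (fun x _ => by simp only [decide_eq_decide]; omega)
      have hlt : (seen.filter (fun x => decide (x ≤ u - 1))).length < f := by
        rw [hco]
        have := filter_lt_pred seen u hu
        omega
      obtain ⟨h1, h2, h3⟩ := ih (u - 1) hlt
      refine ⟨h1, by omega, ?_⟩
      intro v hv1 hv2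
      by_cases hvu : v = u
      · exact hvu ▸ hu
      · exact h3 v hv1 (by omega)
    · have hcb : PySem.Set.contains seen u = false := by
        rcases Bool.eq_false_or_eq_true (PySem.Set.contains seen u) with h | h
        · exact absurd h hc
        · exact h
      have hu : u ∉ seen := by
        intro hm
        exact hc (by simpa [PySem.Set.contains_eq_listContains] using hm)
      rw [show findU seen (f + 1) u = u from by simp only [findU, hcb, Bool.false_eq_true, if_false]]
      exact ⟨hu, le_refl u, fun v hv1 hv2 => absurd (lt_of_lt_of_le hv1 hv2) (lt_irrefl u)⟩

-- filling from box = m+1 up to a fresh target t = m+g+1 pushes exactly the run t,…,m+1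
lemma push_run : ∀ (g : Nat) (m : Nat) (seen : List Int) (t : Int),
    (∀ x ∈ seen, x ≤ (m : Int)) → t = (m : Int) + (g : Int) + 1 →
    fillS (t + 1 - ((m : Int) + 1)).toNat t ((m : Int) + 1) (stackOf m seen)
      = (t + 1, t :: stackOf (m + g) seen) := by
  intro g
  induction g with
  | zero =>
    intro m seen t _ ht
    have h1 : (t + 1 - ((m : Int) + 1)).toNat = 1 := by omega
    rw [h1]
    simp only [fillS, if_pos (by omega : (m : Int) + 1 ≤ t)]
    rw [show t = (m : Int) + 1 by omega]
    simp
  | succ g ih =>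
    intro m seen t hseen ht
    have h1 : (t + 1 - ((m : Int) + 1)).toNat = ((g : Int) + 2).toNat := by push_cast at ht ⊢; omega
    have h2 : ((g : Int) + 2).toNat = (t + 1 - ((m : Int) + 1 + 1)).toNat + 1 := by push_cast at ht ⊢; omega
    rw [h1, h2]
    simp only [fillS, if_pos (by push_cast at ht ⊢; omega : (m : Int) + 1 ≤ t)]
    have hcons : ((m : Int) + 1) :: stackOf m seen = stackOf (m + 1) seen := by
      simp only [stackOf]
      rw [if_neg (by intro hx; have := hseen _ hx; omega)]
    rw [hcons]
    have := ih (m + 1) seen t (fun x hx => le_trans (hseen x hx) (by push_cast; omega))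
      (by push_cast at ht ⊢; omega)
    rw [show ((m + 1 : Nat) : Int) + 1 = (m : Int) + 1 + 1 by push_cast; ring] at this
    rw [show (m + 1 + g) = (m + (g + 1)) by omega] at this
    exact this

-- main bridge: the stack simulation from state (box = m+1, stack = stackOf m seen)
-- equals B's seen-set loop from state (seen, m)
lemma goStack_eq_goSeen : ∀ (targets : List Int) (m : Nat) (seen : List Int) (ans : Int),
    (∀ x ∈ seen, 1 ≤ x ∧ x ≤ (m : Int)) →
    goStack targets ((m : Int) + 1) (stackOf m seen) ans = goSeen targets seen (m : Int) ans := by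
  intro targets
  induction targets with
  | nil => intro m seen ans _; rfl
  | cons t rest ih =>
    intro m seen ans hseen
    have hfind : (seen.filter (fun x => decide (x ≤ (m : Int)))).length < seen.length + 1 :=
      lt_of_le_of_lt (List.length_filter_le _ _) (by omega)
    obtain ⟨hf1, hf2, hf3⟩ := findU_correct seen (seen.length + 1) (m : Int) hfind
    set u := findU seen (seen.length + 1) (m : Int) with hu
    by_cases ht1 : t < 1
    · -- B breaks on a non-positive target; A's stack holds only boxes ≥ 1
      rw [show goSeen (t :: rest) seen (m : Int) ans = ans from by simp [goSeen, ht1]]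
      simp only [goStack]
      rcases hs : stackOf m seen with _ | ⟨top, r⟩
      · rw [fillS_gt _ ([] : List Int) (by omega : ¬ ((m : Int) + 1) ≤ t)]
      · obtain ⟨_, hp2, _, _⟩ := stackOf_head_prop m seen top r hs
        rw [fillS_gt _ (top :: r) (by omega : ¬ ((m : Int) + 1) ≤ t)]
        have htop : ¬ top = t := by omega
        simp [htop]
    · by_cases ht2 : t ≤ (m : Int)
      · -- target below the running max: matchable iff it is the largest unseen box
        rcases hs : stackOf m seen with _ | ⟨top, r⟩
        · -- every box 1..m already unloaded: u = 0, both break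
          have hall := stackOf_nil_prop m seen hs
          have hu0 : u = 0 := by
            rcases lt_trichotomy u 0 with hneg | hz | hpos
            · exfalso
              have h0 : (0 : Int) ∈ seen := hf3 0 hneg (by exact_mod_cast Nat.zero_le m)
              have := (hseen 0 h0).1
              omega
            · exact hz
            · exact absurd (hall u (by omega) hf2) hf1
          have hut : u ≠ t := by omega
          rw [show goSeen (t :: rest) seen (m : Int) ans = ans from by
            simp only [goSeen, if_neg (by omega : ¬ t < 1), if_pos ht2, ← hu]
            simp [hut]]
          simp only [goStack]
          rw [fillS_gt _ ([] : List Int) (by omega : ¬ ((m : Int) + 1) ≤ t)]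
        · obtain ⟨hp1, hp2, hp3, hp4⟩ := stackOf_head_prop m seen top r hs
          -- u = top: both are the largest box ≤ m not in seen
          have hutop : u = top := by
            rcases lt_trichotomy u top with hlt | he | hgt'
            · exact absurd (hf3 top hlt hp3) hp1
            · exact he
            · exact absurd (hp4 u hgt' hf2) hf1
          by_cases htop : top = t
          · -- pop / match
            have htns : t ∉ seen := htop ▸ hp1
            have hadd : PySem.Set.add seen t = seen ++ [t] := PySem.Set.add_of_not_mem htns
            rw [show goSeen (t :: rest) seen (m : Int) ans
                  = goSeen rest (PySem.Set.add seen t) (m : Int) (ans + 1) from by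
              simp only [goSeen, if_neg (by omega : ¬ t < 1), if_pos ht2, ← hu]
              simp [hutop, htop]]
            simp only [goStack]
            rw [fillS_gt _ (top :: r) (by omega : ¬ ((m : Int) + 1) ≤ t)]
            simp only [htop, reduceIte]
            rw [show r = stackOf m (seen ++ [t]) from (stackOf_pop m seen t r (htop ▸ hs)).symm]
            rw [hadd]
            exact ih m (seen ++ [t]) (ans + 1) (by
              intro x hx
              rcases List.mem_append.mp hx with hx | hx
              · exact hseen x hx
              · simp at hx; omega)
          · -- mismatch: both break
            have hut : u ≠ t := by rw [hutop]; exact htop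
            rw [show goSeen (t :: rest) seen (m : Int) ans = ans from by
              simp only [goSeen, if_neg (by omega : ¬ t < 1), if_pos ht2, ← hu]
              simp [hut]]
            simp only [goStack]
            rw [fillS_gt _ (top :: r) (by omega : ¬ ((m : Int) + 1) ≤ t)]
            simp [htop]
      · -- fresh maximum: A pushes m+1..t and pops t; B records a new maximum
        have htns : t ∉ seen := fun hx => ht2 (hseen t hx).2
        have hadd : PySem.Set.add seen t = seen ++ [t] := PySem.Set.add_of_not_mem htns
        obtain ⟨g, hg⟩ : ∃ g : Nat, t = (m : Int) + (g : Int) + 1 :=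
          ⟨(t - m - 1).toNat, by omega⟩
        rw [show goSeen (t :: rest) seen (m : Int) ans
              = goSeen rest (PySem.Set.add seen t) t (ans + 1) from by
          simp [goSeen, ht1, ht2]]
        simp only [goStack]
        rw [push_run g m seen t (fun x hx => (hseen x hx).2) hg]
        simp only [reduceIte]
        have hmg : stackOf (m + g) seen = stackOf (m + g) (seen ++ [t]) :=
          (stackOf_append_of_gt (m + g) seen t (by push_cast; omega)).symm
        have hstep : stackOf (m + g) (seen ++ [t]) = stackOf (m + g + 1) (seen ++ [t]) := by
          simp only [stackOf]
          rw [if_pos (by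
            apply List.mem_append_right
            simp
            omega)]
        have hrec := ih (m + g + 1) (seen ++ [t]) (ans + 1) (by
          intro x hx
          rcases List.mem_append.mp hx with hx | hx
          · have := hseen x hx; constructor <;> push_cast <;> omega
          · simp at hx; subst hx; constructor <;> push_cast <;> omega)
        rw [show ((m + g + 1 : Nat) : Int) + 1 = t + 1 from by push_cast; omega] at hrec
        rw [show ((m + g + 1 : Nat) : Int) = t from by push_cast; omega] at hrec
        rw [hmg, hstep, hadd]
        simpa using hrec

-- ===== VERDICT (by name: the statement is the Claim_ definition above) =====
theorem solution_spec : Claim_equal_solution := by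
  intro order _ hpre
  unfold Spec_solution solution
  rcases hm : PySem.List.max? order (fun x => x) with _ | m
  · exact absurd ((PySem.List.max?_eq_none_iff order (fun x => x)).mp hm) hpre
  · have hmax : ∀ x ∈ order, x ≤ m := fun x hx => PySem.List.max?_isMax hm x hx
    have h := loop_eq_goStack order m hmax (2 * (m + 1).toNat + 1) 0 1 [] 0
      (by simp; omega) (by simp) (by simp)
    have hb := goStack_eq_goSeen order 0 [] 0 (by simp)
    simp only [Nat.cast_zero, zero_add] at hb
    rw [show stackOf 0 [] = [] from rfl] at hb
    simp only [List.drop_zero] at h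
    show solutionLoop order m (2 * (m + 1).toNat + 1) 0 1 [] 0 = solution_alt order
    rw [h, hb]
    rfl
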